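-- pv_equiv track=rewrite | github.com/Pandaemonium/CausalOctonionGraph | calc/extract_alpha_lightcone.py | _discrete_acceleration
-- ===== SOURCE A (Python) =====
-- from typing import Any, Dict, List, Tuple
--
-- def _discrete_acceleration(depth_distance: List[Tuple[int, int]]) -> Dict[int, int]:
--     if len(depth_distance) < 3:
--         return {}
--     acc: Dict[int, int] = {}
--     for i in range(1, len(depth_distance) - 1):
--         d_prev = depth_distance[i - 1][1]
--         depth = depth_distance[i][0]
--         d_cur = depth_distance[i][1]
--         d_next = depth_distance[i + 1][1]
--         acc[depth] = d_next - 2 * d_cur + d_prev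
--     return acc
-- ===== SOURCE B (Python) =====
-- from typing import Dict, List, Tuple
--
-- def _discrete_acceleration(depth_distance: List[Tuple[int, int]]) -> Dict[int, int]:
--     if len(depth_distance) < 3:
--         return {}
--     vals = [d for _, d in depth_distance]
--     d1 = [y - x for x, y in zip(vals, vals[1:])]
--     d2 = [y - x for x, y in zip(d1, d1[1:])]
--     return {k: a for (k, _), a in zip(depth_distance[1:], d2)}
-- ===== Notes on version B (the rewrite author's own statement) =====
-- stated objective: alternative
-- what changed: Replaces the fused index loop reading three positions per step with a build-then-combine pipeline: a list of first differences, then its own differences, zipped with the shifted input into a dict comprehension (no indexing at all).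
import Mathlib
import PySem

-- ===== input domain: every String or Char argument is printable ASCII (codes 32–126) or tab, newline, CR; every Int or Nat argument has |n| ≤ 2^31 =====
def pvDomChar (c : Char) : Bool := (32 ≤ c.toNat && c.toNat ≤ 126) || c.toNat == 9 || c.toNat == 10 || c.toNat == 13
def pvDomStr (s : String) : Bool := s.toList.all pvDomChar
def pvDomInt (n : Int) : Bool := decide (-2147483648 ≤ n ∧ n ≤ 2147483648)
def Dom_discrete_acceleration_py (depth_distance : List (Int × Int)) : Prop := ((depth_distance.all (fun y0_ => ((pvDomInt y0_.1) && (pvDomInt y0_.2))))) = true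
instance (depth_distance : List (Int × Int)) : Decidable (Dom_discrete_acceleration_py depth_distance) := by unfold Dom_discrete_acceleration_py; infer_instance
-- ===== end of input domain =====

-- Different decomposition with the same O(n) cost: B builds first differences, then their
-- differences, and zips them with the shifted input, instead of A's fused three-reads-per-index loop.


-- ===== PORT A =====
def discrete_acceleration_py (depth_distance : List (Int × Int)) : List (Int × Int) :=
  if depth_distance.length < 3 then [] else
  ((PySem.List.pyRange 1 ((depth_distance.length : Int) - 1) 1).foldl
    (fun (acc : PySem.Dict Int Int) i =>
      let d_prev := (PySem.List.pyGetD depth_distance (i - 1) (0, 0)).2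
      let depth := (PySem.List.pyGetD depth_distance i (0, 0)).1
      let d_cur := (PySem.List.pyGetD depth_distance i (0, 0)).2
      let d_next := (PySem.List.pyGetD depth_distance (i + 1) (0, 0)).2
      acc.insert depth (d_next - 2 * d_cur + d_prev))
    PySem.Dict.empty).items

-- ===== PORT B =====
def discrete_acceleration_py_alt (depth_distance : List (Int × Int)) : List (Int × Int) :=
  if depth_distance.length < 3 then [] else
  let vals := depth_distance.map Prod.snd
  let d1 := List.zipWith (fun x y => y - x) vals vals.tail
  let d2 := List.zipWith (fun x y => y - x) d1 d1.tail
  ((depth_distance.tail.zip d2).foldl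
    (fun (acc : PySem.Dict Int Int) p => acc.insert p.1.1 p.2)
    PySem.Dict.empty).items

-- ===== PRECONDITION & SPEC =====
def Spec_discrete_acceleration_py (depth_distance : List (Int × Int)) (out : List (Int × Int)) : Prop := out = discrete_acceleration_py_alt depth_distance
instance (depth_distance : List (Int × Int)) (out : List (Int × Int)) : Decidable (Spec_discrete_acceleration_py depth_distance out) := by unfold Spec_discrete_acceleration_py; infer_instance

-- ===== CLAIM (what is proved, stated in full; the proofs are below) =====
def Claim_equal_discrete_acceleration_py : Prop := ∀ (depth_distance : List (Int × Int)), Dom_discrete_acceleration_py depth_distance → Spec_discrete_acceleration_py depth_distance (discrete_acceleration_py depth_distance)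

-- ===== LEMMAS AND PROOFS =====

-- The index list A folds over, mapped through A's loop body's (key, value) reads, is exactly
-- the zipped list B folds over.
lemma pairs_eq (dd : List (Int × Int)) (h : ¬ dd.length < 3) :
    (PySem.List.pyRange 1 ((dd.length : Int) - 1) 1).map
      (fun i => ((PySem.List.pyGetD dd i ((0 : Int), (0 : Int))).1,
        (PySem.List.pyGetD dd (i + 1) ((0 : Int), (0 : Int))).2
          - 2 * (PySem.List.pyGetD dd i ((0 : Int), (0 : Int))).2
          + (PySem.List.pyGetD dd (i - 1) ((0 : Int), (0 : Int))).2))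
    = (dd.tail.zip (List.zipWith (fun x y => y - x)
        (List.zipWith (fun x y => y - x) (dd.map Prod.snd) (dd.map Prod.snd).tail)
        (List.zipWith (fun x y => y - x) (dd.map Prod.snd) (dd.map Prod.snd).tail).tail)).map
        (fun p => (p.1.1, p.2)) := by
  apply List.ext_getElem
  · simp [PySem.List.length_pyRange_one, List.length_zip, List.length_zipWith]
  · intro j hj hj'
    have hlen : (PySem.List.pyRange 1 ((dd.length : Int) - 1) 1).length = dd.length - 2 := by
      simp [PySem.List.length_pyRange_one]; omega
    rw [List.length_map, hlen] at hj
    have hj2 : j + 2 < dd.length := by omega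
    have hget : ∀ (k : Nat) (hk : k < dd.length),
        PySem.List.pyGetD dd ((k : Int)) ((0 : Int), (0 : Int)) = dd[k] := by
      intro k hk
      rw [PySem.List.pyGetD_natCast]
      exact List.getD_eq_getElem dd _ hk
    simp only [List.getElem_map, PySem.List.getElem_pyRange_one]
    have e1 : (1 : Int) + (j : Int) = ((j + 1 : Nat) : Int) := by push_cast; ring
    have e2 : ((j + 1 : Nat) : Int) + 1 = ((j + 2 : Nat) : Int) := by push_cast; ring
    have e3 : ((j + 1 : Nat) : Int) - 1 = ((j : Nat) : Int) := by push_cast; ring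
    rw [e1, e2, e3, hget (j + 1) (by omega), hget (j + 2) (by omega), hget j (by omega)]
    simp only [List.getElem_map, List.getElem_zip, List.getElem_tail,
      List.getElem_zipWith]
    refine Prod.ext rfl ?_
    simp only []
    ring

-- Folding key/value inserts over two lists that project to the same (key, value) list
-- gives the same dict.
lemma foldl_insert_eq (f : Int → Int × Int) (l : List Int) (L : List ((Int × Int) × Int))
    (hEq : l.map f = L.map (fun p => (p.1.1, p.2))) (d : PySem.Dict Int Int) :
    l.foldl (fun acc i => acc.insert (f i).1 (f i).2) d
      = L.foldl (fun acc p => acc.insert p.1.1 p.2) d := by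
  have h2 := congrArg (List.foldl (fun (acc : PySem.Dict Int Int) (p : Int × Int) =>
    acc.insert p.1 p.2) d) hEq
  simpa [List.foldl_map] using h2

-- ===== VERDICT (by name: the statement is the Claim_ definition above) =====
theorem discrete_acceleration_py_spec : Claim_equal_discrete_acceleration_py := by
  intro dd _
  unfold Spec_discrete_acceleration_py discrete_acceleration_py discrete_acceleration_py_alt
  by_cases h : dd.length < 3
  · simp [h]
  · simp only [h, if_false]
    congr 1
    exact foldl_insert_eq
      (fun i => ((PySem.List.pyGetD dd i ((0 : Int), (0 : Int))).1,
        (PySem.List.pyGetD dd (i + 1) ((0 : Int), (0 : Int))).2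
          - 2 * (PySem.List.pyGetD dd i ((0 : Int), (0 : Int))).2
          + (PySem.List.pyGetD dd (i - 1) ((0 : Int), (0 : Int))).2))
      _ _ (pairs_eq dd h) PySem.Dict.empty
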